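-- pv_equiv track=rewrite | github.com/antieau/snforacle | snforacle/backends/magma.py | _parse_magma_ed_output
-- ===== SOURCE A (Python) =====
-- def _safe_parse_ints(tokens: list[str]) -> list[int]:
--     """Parse a list of string tokens to integers, handling backslashes from line wrapping.
--
--     When MAGMA output lines are very long, they may wrap, and tokens can have trailing
--     backslashes indicating continuation. Strip these before parsing.
--     """
--     result = []
--     for token in tokens:
--         # Remove trailing backslash (line continuation marker from MAGMA output wrapping)
--         token = token.rstrip('\\').strip()
--         # Skip empty tokens (can occur from multiple spaces or line endings)
--         if token and token != '':
--             try: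
--                 result.append(int(token))
--             except ValueError:
--                 # Skip tokens that can't be parsed as integers
--                 pass
--     return result
--
-- def _parse_magma_ed_output(stdout: str) -> dict:
--     """Parse ED line from MAGMA output, handling line wrapping and numbers split across lines."""
--     ed_flat: list[int] | None = None
--     last_token_incomplete = False
--     incomplete_token = ""
--
--     for line in stdout.splitlines():
--         line = line.strip()
--         if not line:
--             continue
--
--         tokens = line.split()
--
--         # Handle incomplete token from previous line
--         if last_token_incomplete and tokens:
--             tokens[0] = incomplete_token + tokens[0]
--             last_token_incomplete = False
--             incomplete_token = ""
--
--         ends_with_backslash = line.endswith("\\")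
--
--         if line.startswith("ED"):
--             ed_tokens = line[2:].split()
--             if ends_with_backslash and ed_tokens:
--                 last_token = ed_tokens[-1].rstrip('\\')
--                 ed_tokens[-1] = last_token
--                 incomplete_token = last_token
--                 ed_tokens = ed_tokens[:-1]
--                 last_token_incomplete = True
--             ed_flat = _safe_parse_ints(ed_tokens)
--         elif ed_flat is not None:
--             # Continuation line: append more values
--             if ends_with_backslash and tokens:
--                 last_token = tokens[-1].rstrip('\\')
--                 tokens[-1] = last_token
--                 incomplete_token = last_token
--                 tokens = tokens[:-1]
--                 last_token_incomplete = True
--             ed_flat.extend(_safe_parse_ints(tokens))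
--
--     if ed_flat is not None:
--         return {"elementary_divisors": ed_flat}
--
--     raise ValueError(f"Could not parse MAGMA ED output. stdout was:\n{stdout}")
-- ===== SOURCE B (Python) =====
-- def _parse_magma_ed_output(stdout: str) -> dict:
--     """Parse the ED line (and its wrapped continuations) from MAGMA output.
--
--     Strategy: clean the lines once, locate the LAST line starting with "ED"
--     (each ED line restarts the list), flatten that whole block into a single
--     token stream while gluing tokens split by trailing-backslash line wraps,
--     then parse the tokens in one pass.
--     """
--     lines = [s for s in (raw.strip() for raw in stdout.splitlines()) if s]
--
--     # Scan from the end for the last "ED" line; the block is everything from there on.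
--     block = None
--     for i in reversed(range(len(lines))):
--         if lines[i].startswith("ED"):
--             block = lines[i:]
--             break
--     if block is None:
--         raise ValueError(f"Could not parse MAGMA ED output. stdout was:\n{stdout}")
--
--     # Flatten the block into one token stream, joining across wrapped lines.
--     pieces = [block[0][2:]] + block[1:]
--     tokens = []
--     pending = None
--     for piece in pieces:
--         toks = piece.split()
--         if pending is not None and toks:
--             toks[0] = pending + toks[0]
--             pending = None
--         if piece.endswith("\\") and toks:
--             pending = toks.pop().rstrip("\\")
--         tokens.extend(toks)
--
--     divisors = []
--     for t in tokens:
--         t = t.rstrip("\\").strip()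
--         if t:
--             try:
--                 divisors.append(int(t))
--             except ValueError:
--                 pass
--     return {"elementary_divisors": divisors}
-- ===== Notes on version B (the rewrite author's own statement) =====
-- stated objective: simpler
-- what changed: A runs a stateful line-by-line machine over the whole file (ed_flat reset/extend plus incomplete-token flags); B instead cleans the lines once, locates the LAST line starting with 'ED' by a reverse scan, flattens that block into a single token stream (gluing tokens split by trailing-backslash wraps), and parses the tokens in one final pass.
import Mathlib
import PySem

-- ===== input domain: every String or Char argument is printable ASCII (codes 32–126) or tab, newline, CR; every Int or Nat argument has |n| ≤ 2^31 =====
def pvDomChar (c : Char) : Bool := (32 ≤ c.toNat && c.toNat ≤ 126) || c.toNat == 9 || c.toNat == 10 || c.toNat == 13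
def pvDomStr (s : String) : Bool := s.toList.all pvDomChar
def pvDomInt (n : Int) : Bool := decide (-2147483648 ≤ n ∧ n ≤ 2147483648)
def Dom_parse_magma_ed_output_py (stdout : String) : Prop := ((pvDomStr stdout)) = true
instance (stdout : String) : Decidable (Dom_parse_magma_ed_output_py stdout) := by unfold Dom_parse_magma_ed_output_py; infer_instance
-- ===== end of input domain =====

-- B locates the LAST "ED" line once and flattens that block into a single token
-- stream (one join/parse pass) instead of A's whole-file state machine: simpler decomposition, same results.

-- ===== PORT A =====

-- token.rstrip('\\')  (drop trailing backslashes; exact: rstrip with an explicit char set)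
def pvARstripBS (t : List Char) : List Char := (t.reverse.dropWhile (fun c => c == '\\')).reverse

-- _safe_parse_ints: fold over tokens, rstrip backslashes + strip, skip empties, int() or skip
def pvSafeParseInts (tokens : List (List Char)) : List Int :=
  tokens.foldl (fun result token =>
    let tok := PySem.Chars.strip (pvARstripBS token)
    if tok ≠ [] then
      match PySem.Int.ofChars? tok with
      | some n => result ++ [n]
      | none => result
    else result) []

-- the body of A's `for line in stdout.splitlines()` loop; state = (ed_flat, last_token_incomplete, incomplete_token)
def pvAStep (st : Option (List Int) × Bool × List Char) (line0 : List Char) :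
    Option (List Int) × Bool × List Char :=
  let line := PySem.Chars.strip line0
  if line = [] then st
  else
    let ed_flat := st.1
    let tokens0 := PySem.Chars.split₀ line
    -- handle incomplete token from previous line
    let tp : List (List Char) × Bool × List Char :=
      if st.2.1 = true ∧ tokens0 ≠ [] then ((st.2.2 ++ tokens0.headI) :: tokens0.tail, false, [])
      else (tokens0, st.2.1, st.2.2)
    let tokens := tp.1
    let lti := tp.2.1
    let inc := tp.2.2
    let ebs := PySem.Chars.endswith line ['\\']
    if PySem.Chars.startswith line ['E', 'D'] = true then
      let ed_tokens := PySem.Chars.split₀ (PySem.List.slice line (some 2) none)  -- line[2:].split()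
      if ebs = true ∧ ed_tokens ≠ [] then
        -- ed_tokens[-1] = ed_tokens[-1].rstrip('\\'); pop it; remember it as incomplete
        (some (pvSafeParseInts ed_tokens.dropLast), true, pvARstripBS (ed_tokens.getLastD []))
      else (some (pvSafeParseInts ed_tokens), lti, inc)
    else
      match ed_flat with
      | some ed =>
        if ebs = true ∧ tokens ≠ [] then
          (some (ed ++ pvSafeParseInts tokens.dropLast), true, pvARstripBS (tokens.getLastD []))
        else (some (ed ++ pvSafeParseInts tokens), lti, inc)
      | none => (none, lti, inc)

def parse_magma_ed_output_py (stdout : String) : List (String × List Int) :=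
  let st := (PySem.Chars.splitlines stdout.toList).foldl pvAStep (none, false, [])
  match st.1 with
  | some ed => [("elementary_divisors", ed)]
  | none => []  -- Python A raises ValueError here; excluded by Pre_

-- ===== PORT B =====

-- t.rstrip('\\')
def pvBRstripBS (t : List Char) : List Char := (t.reverse.dropWhile (fun c => c == '\\')).reverse

-- reverse scan for the last line starting with "ED": returns (that line, the lines after it)
def pvBLastEDBlock : List (List Char) → Option (List Char × List (List Char))
  | [] => none
  | l :: rest =>
    match pvBLastEDBlock rest with
    | some b => some b
    | none => if PySem.Chars.startswith l ['E', 'D'] = true then some (l, rest) else none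

-- one piece of the block: split, glue the pending fragment onto the first token,
-- and if the piece ends with '\' pop its last token (backslashes stripped) as the new pending
def pvBStep (acc : List (List Char) × Option (List Char)) (piece : List Char) :
    List (List Char) × Option (List Char) :=
  let toks0 := PySem.Chars.split₀ piece
  let tp : List (List Char) × Option (List Char) :=
    match acc.2 with
    | some p => if toks0 ≠ [] then ((p ++ toks0.headI) :: toks0.tail, none) else (toks0, some p)
    | none => (toks0, none)
  if PySem.Chars.endswith piece ['\\'] = true ∧ tp.1 ≠ [] then
    (acc.1 ++ tp.1.dropLast, some (pvBRstripBS (tp.1.getLastD [])))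
  else (acc.1 ++ tp.1, tp.2)

-- the final `for t in tokens` parse loop of B
def pvBParse (tokens : List (List Char)) : List Int :=
  tokens.foldl (fun divisors t =>
    let t' := PySem.Chars.strip (pvBRstripBS t)
    if t' ≠ [] then
      match PySem.Int.ofChars? t' with
      | some n => divisors ++ [n]
      | none => divisors
    else divisors) []

def parse_magma_ed_output_py_alt (stdout : String) : List (String × List Int) :=
  let lines := ((PySem.Chars.splitlines stdout.toList).map PySem.Chars.strip).filter (fun l => l ≠ [])
  match pvBLastEDBlock lines with
  | none => []  -- Python B raises ValueError here; excluded by Pre_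
  | some (e, rest) =>
    let pieces := PySem.List.slice e (some 2) none :: rest  -- [block[0][2:]] + block[1:]
    let tokens := (pieces.foldl pvBStep ([], none)).1
    [("elementary_divisors", pvBParse tokens)]

-- ===== PRECONDITION & SPEC =====
-- Pre_ excludes exactly the inputs with no (stripped) line starting with "ED", on which Python A raises ValueError.
def Pre_parse_magma_ed_output_py (stdout : String) : Prop :=
  (PySem.Chars.splitlines stdout.toList).any
    (fun l => PySem.Chars.startswith (PySem.Chars.strip l) ['E', 'D']) = true
instance (stdout : String) : Decidable (Pre_parse_magma_ed_output_py stdout) := by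
  unfold Pre_parse_magma_ed_output_py; infer_instance

def pvWitness_parse_magma_ed_output_py : String := "ED 6 12 \\\n24"

def Spec_parse_magma_ed_output_py (stdout : String) (out : List (String × List Int)) : Prop := out = parse_magma_ed_output_py_alt stdout
instance (stdout : String) (out : List (String × List Int)) : Decidable (Spec_parse_magma_ed_output_py stdout out) := by unfold Spec_parse_magma_ed_output_py; infer_instance

-- ===== CLAIM (what is proved, stated in full; the proofs are below) =====
def Claim_equal_parse_magma_ed_output_py : Prop := ∀ (stdout : String), Dom_parse_magma_ed_output_py stdout → Pre_parse_magma_ed_output_py stdout → Spec_parse_magma_ed_output_py stdout (parse_magma_ed_output_py stdout)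

-- ===== LEMMAS AND PROOFS =====

-- the option-valued per-token parser both parse loops implement
def pvTok? (t : List Char) : Option Int :=
  let t' := PySem.Chars.strip (pvBRstripBS t)
  if t' = [] then none else PySem.Int.ofChars? t'

lemma pvBParse_eq_flatMap (ts : List (List Char)) :
    pvBParse ts = ts.flatMap (fun t => (pvTok? t).toList) := by
  unfold pvBParse
  have hbody : (fun (divisors : List Int) (t : List Char) =>
      let t' := PySem.Chars.strip (pvBRstripBS t)
      if t' ≠ [] then
        match PySem.Int.ofChars? t' with
        | some n => divisors ++ [n]
        | none => divisors
      else divisors) = fun divisors t => divisors ++ (pvTok? t).toList := by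
    funext divisors t
    by_cases h : PySem.Chars.strip (pvBRstripBS t) = []
    · simp [pvTok?, h]
    · cases hc : PySem.Int.ofChars? (PySem.Chars.strip (pvBRstripBS t)) <;> simp [pvTok?, h, hc]
  rw [hbody]
  exact PySem.List.foldl_append_eq_flatMap ..

lemma pvSafeParseInts_eq (ts : List (List Char)) : pvSafeParseInts ts = pvBParse ts := rfl

lemma pvBParse_nil : pvBParse [] = [] := rfl

lemma pvBParse_append (xs ys : List (List Char)) :
    pvBParse (xs ++ ys) = pvBParse xs ++ pvBParse ys := by
  simp [pvBParse_eq_flatMap]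

-- A's fold state as a function of B's (block, collected tokens, pending fragment)
def pvPhi : Option (List Char × List (List Char)) → Option (List Int) × Bool × List Char
  | none => (none, false, [])
  | some (e, rest) =>
    let pieces := PySem.List.slice e (some 2) none :: rest
    let tp := pieces.foldl pvBStep ([], none)
    (some (pvBParse tp.1), tp.2.isSome, tp.2.getD [])

def pvUpd (b : Option (List Char × List (List Char))) (l : List Char) :
    Option (List Char × List (List Char)) :=
  if PySem.Chars.startswith l ['E', 'D'] = true then some (l, [])
  else match b with
    | some (e, r) => some (e, r ++ [l])
    | none => none

lemma pvBLastEDBlock_snoc (L : List (List Char)) (l : List Char) :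
    pvBLastEDBlock (L ++ [l]) = pvUpd (pvBLastEDBlock L) l := by
  induction L with
  | nil => cases h : PySem.Chars.startswith l ['E', 'D'] <;> simp [pvBLastEDBlock, pvUpd, h]
  | cons a L ih =>
    simp only [List.cons_append, pvBLastEDBlock, ih, pvUpd]
    cases hl : PySem.Chars.startswith l ['E', 'D'] <;>
      cases hb : pvBLastEDBlock L <;>
      cases ha : PySem.Chars.startswith a ['E', 'D'] <;> simp

-- structural string facts
lemma pv_go_nil : ∀ (s cur : List Char) (acc : List (List Char)),
    PySem.Chars.split₀.go s cur acc = [] → (acc = [] ∧ cur = []) := by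
  intro s
  induction s with
  | nil =>
      intro cur acc h
      rw [PySem.Chars.split₀.go.eq_def] at h
      dsimp only at h
      split_ifs at h with hc
      · exact ⟨by simpa using h, by simpa using hc⟩
      · simp at h
  | cons c rest ih =>
      intro cur acc h
      rw [PySem.Chars.split₀.go.eq_def] at h
      dsimp only at h
      split_ifs at h with h1 h2
      · have := ih _ _ h; exact ⟨this.1, by simpa using h2⟩
      · have := ih _ _ h; simp at this
      · have := ih _ _ h; simp at this

lemma pv_strip_idem (l : List Char) : PySem.Chars.strip (PySem.Chars.strip l) = PySem.Chars.strip l := by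
  set y := PySem.Chars.lstrip l with hy
  have hxrev : (PySem.Chars.strip l).reverse = List.dropWhile PySem.Chars.isspace y.reverse := by
    simp [PySem.Chars.strip, PySem.Chars.rstrip, hy]
  have hr : PySem.Chars.rstrip (PySem.Chars.strip l) = PySem.Chars.strip l := by
    unfold PySem.Chars.rstrip
    rw [hxrev, List.dropWhile_idempotent, ← hxrev, List.reverse_reverse]
  have hl : PySem.Chars.lstrip (PySem.Chars.strip l) = PySem.Chars.strip l := by
    unfold PySem.Chars.lstrip
    cases hcl : PySem.Chars.strip l with
    | nil => simp
    | cons c cs =>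
      have hpre : PySem.Chars.strip l <+: y := by
        have : (PySem.Chars.strip l).reverse <:+ y.reverse := hxrev ▸ List.dropWhile_suffix _
        simpa using this.reverse
      obtain ⟨t, ht⟩ := hpre
      rw [hcl] at ht
      have hnd : List.dropWhile PySem.Chars.isspace y = y := by
        rw [hy, PySem.Chars.lstrip, List.dropWhile_idempotent]
      rw [← ht] at hnd
      simp only [List.cons_append, List.dropWhile_cons] at hnd
      by_cases hc : PySem.Chars.isspace c = true
      · rw [if_pos hc] at hnd
        have := congrArg List.length hnd
        have hle := (List.dropWhile_suffix (p := PySem.Chars.isspace) (l := cs ++ t)).length_le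
        simp at this hle
        omega
      · simp only [List.dropWhile_cons, if_neg hc]
  calc PySem.Chars.strip (PySem.Chars.strip l)
      = PySem.Chars.rstrip (PySem.Chars.strip l) := by rw [PySem.Chars.strip, hl]
    _ = PySem.Chars.strip l := hr

lemma pv_split₀_ne_nil (l : List Char) (hs : PySem.Chars.strip l = l) (hne : l ≠ []) :
    PySem.Chars.split₀ l ≠ [] := by
  have hls : PySem.Chars.lstrip l = l := by
    have h1 : (PySem.Chars.lstrip l).length ≤ l.length := (List.dropWhile_suffix _).length_le
    have h2 : (PySem.Chars.strip l).length ≤ (PySem.Chars.lstrip l).length := by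
      unfold PySem.Chars.strip PySem.Chars.rstrip
      simpa using ((List.dropWhile_suffix (l := (PySem.Chars.lstrip l).reverse) (p := PySem.Chars.isspace)).length_le)
    rw [hs] at h2
    exact (List.dropWhile_suffix _).eq_of_length (le_antisymm h1 h2)
  cases l with
  | nil => simp at hne
  | cons c cs =>
      have hcns : PySem.Chars.isspace c = false := by
        by_contra hsp
        simp only [Bool.not_eq_false] at hsp
        have : PySem.Chars.lstrip (c :: cs) = PySem.Chars.lstrip cs := by
          simp [PySem.Chars.lstrip, hsp]
        rw [hls] at this
        have := congrArg List.length this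
        have hle : (PySem.Chars.lstrip cs).length ≤ cs.length := (List.dropWhile_suffix _).length_le
        simp [PySem.Chars.lstrip] at this hle
        omega
      intro hcon
      unfold PySem.Chars.split₀ at hcon
      rw [PySem.Chars.split₀.go.eq_def] at hcon
      dsimp only at hcon
      rw [hcns] at hcon
      simp only [Bool.false_eq_true, if_false] at hcon
      have := pv_go_nil _ _ _ hcon
      simp at this

lemma pv_slice2_eq_drop (l : List Char) : PySem.List.slice l (some 2) none = l.drop 2 := by
  simp [pysem]

lemma pv_endswith_singleton (s : List Char) (c : Char) :
    PySem.Chars.endswith s [c] = true ↔ s.getLast? = some c := by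
  rw [PySem.Chars.endswith_iff]
  constructor
  · rintro ⟨t, rfl⟩; simp
  · intro h
    obtain ⟨l', rfl⟩ := List.getLast?_eq_some_iff.mp h
    exact ⟨l', rfl⟩

lemma pv_endswith_drop2 (l : List Char) (hED : PySem.Chars.startswith l ['E', 'D'] = true)
    (hne : PySem.List.slice l (some 2) none ≠ []) :
    PySem.Chars.endswith l ['\\'] = PySem.Chars.endswith (PySem.List.slice l (some 2) none) ['\\'] := by
  rw [pv_slice2_eq_drop] at hne ⊢
  obtain ⟨t, rfl⟩ := (PySem.Chars.startswith_iff _ _).mp hED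
  simp only [List.cons_append, List.nil_append] at hne ⊢
  obtain ⟨x, xs, rfl⟩ := List.exists_cons_of_ne_nil (by simpa using hne)
  rw [Bool.eq_iff_iff, pv_endswith_singleton, pv_endswith_singleton]
  simp [List.getLast?_cons_cons]

-- the two core step lemmas
lemma pv_step_ed (l : List Char) (hs : PySem.Chars.strip l = l) (hne : l ≠ [])
    (hED : PySem.Chars.startswith l ['E', 'D'] = true)
    (ed : Option (List Int)) (pend : Option (List Char)) :
    pvAStep (ed, pend.isSome, pend.getD []) l = pvPhi (some (l, [])) := by
  have ht0 := pv_split₀_ne_nil l hs hne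
  by_cases het : PySem.Chars.split₀ (PySem.List.slice l (some 2) none) = []
  · cases pend <;>
      simp [pvAStep, pvBStep, pvPhi, hs, hne, hED, ht0, het, pvSafeParseInts_eq]
  · have hebs := pv_endswith_drop2 l hED (fun h => het (by rw [h]; rfl))
    cases pend <;>
      cases hbs : PySem.Chars.endswith (PySem.List.slice l (some 2) none) ['\\'] <;>
        simp [pvAStep, pvBStep, pvPhi, hs, hne, hED, ht0, het, hebs, hbs,
              pvARstripBS, pvBRstripBS, pvSafeParseInts_eq]

lemma pv_step_cont (l : List Char) (hs : PySem.Chars.strip l = l) (hne : l ≠ [])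
    (hED : PySem.Chars.startswith l ['E', 'D'] = false)
    (toks : List (List Char)) (pend : Option (List Char)) :
    pvAStep (some (pvBParse toks), pend.isSome, pend.getD []) l
      = (some (pvBParse (pvBStep (toks, pend) l).1),
         (pvBStep (toks, pend) l).2.isSome, (pvBStep (toks, pend) l).2.getD []) := by
  by_cases ht0 : PySem.Chars.split₀ l = []
  · cases pend <;>
      cases hbs : PySem.Chars.endswith l ['\\'] <;>
        simp [pvAStep, pvBStep, hs, hne, hED, ht0, hbs, pvSafeParseInts_eq, pvBParse_nil]
  · cases pend <;>
      cases hbs : PySem.Chars.endswith l ['\\'] <;>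
        simp [pvAStep, pvBStep, hs, hne, hED, ht0, hbs, pvBParse_append,
              pvARstripBS, pvBRstripBS, pvSafeParseInts_eq]

-- pvPhi commutes with snoc-ing one more (stripped, non-empty) line
lemma pv_phi_step (b : Option (List Char × List (List Char))) (l : List Char)
    (hs : PySem.Chars.strip l = l) (hne : l ≠ []) :
    pvAStep (pvPhi b) l = pvPhi (pvUpd b l) := by
  cases b with
  | none =>
    cases hED : PySem.Chars.startswith l ['E', 'D'] with
    | true =>
      have := pv_step_ed l hs hne hED none none
      simpa [pvPhi, pvUpd, hED] using this
    | false =>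
      simp [pvAStep, pvPhi, pvUpd, hs, hne, hED]
  | some er =>
    obtain ⟨e, rest⟩ := er
    cases hED : PySem.Chars.startswith l ['E', 'D'] with
    | true =>
      have := pv_step_ed l hs hne hED
        (some (pvBParse ((PySem.List.slice e (some 2) none :: rest).foldl pvBStep ([], none)).1))
        ((PySem.List.slice e (some 2) none :: rest).foldl pvBStep ([], none)).2
      simpa [pvPhi, pvUpd, hED] using this
    | false =>
      simp only [pvPhi, pvUpd, hED, Bool.false_eq_true, if_false, List.foldl_append,
        List.foldl_cons, List.foldl_nil]
      have := pv_step_cont l hs hne hED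
        ((PySem.List.slice e (some 2) none :: rest).foldl pvBStep ([], none)).1
        ((PySem.List.slice e (some 2) none :: rest).foldl pvBStep ([], none)).2
      simpa using this

-- the main invariant: A's fold over cleaned lines = pvPhi of B's last-ED block
lemma pv_main (L : List (List Char)) (hL : ∀ l ∈ L, PySem.Chars.strip l = l ∧ l ≠ []) :
    L.foldl pvAStep (none, false, []) = pvPhi (pvBLastEDBlock L) := by
  induction L using List.reverseRecOn with
  | nil => rfl
  | append_singleton L l ih =>
    have hl := hL l (by simp)
    have hL' : ∀ x ∈ L, PySem.Chars.strip x = x ∧ x ≠ [] := fun x hx => hL x (by simp [hx])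
    rw [List.foldl_append, List.foldl_cons, List.foldl_nil, ih hL',
        pvBLastEDBlock_snoc, pv_phi_step _ _ hl.1 hl.2]

-- A's fold over raw lines = the fold over the cleaned lines
lemma pv_fold_clean (raw : List (List Char)) (s : Option (List Int) × Bool × List Char) :
    raw.foldl pvAStep s = ((raw.map PySem.Chars.strip).filter (fun l => l ≠ [])).foldl pvAStep s := by
  induction raw generalizing s with
  | nil => rfl
  | cons r rs ih =>
    by_cases h : PySem.Chars.strip r = []
    · have hstep : pvAStep s r = s := by simp [pvAStep, h]
      simp [List.foldl_cons, hstep, h, ih]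
    · have hstep : pvAStep s r = pvAStep s (PySem.Chars.strip r) := by
        unfold pvAStep
        rw [pv_strip_idem]
      simp only [List.map_cons, List.filter_cons]
      rw [if_pos (by simpa using h)]
      simp only [List.foldl_cons]
      rw [← hstep, ih]

-- ===== VERDICT (by name: the statement is the Claim_ definition above) =====
theorem parse_magma_ed_output_py_spec : Claim_equal_parse_magma_ed_output_py := by
  intro stdout _hdom _hpre
  unfold Spec_parse_magma_ed_output_py parse_magma_ed_output_py parse_magma_ed_output_py_alt
  have hL : ∀ l ∈ ((PySem.Chars.splitlines stdout.toList).map PySem.Chars.strip).filter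
      (fun l => l ≠ []), PySem.Chars.strip l = l ∧ l ≠ [] := by
    intro l hl
    rw [List.mem_filter] at hl
    obtain ⟨hm, hne⟩ := hl
    obtain ⟨r, _, rfl⟩ := List.mem_map.mp hm
    exact ⟨pv_strip_idem r, by simpa using hne⟩
  rw [pv_fold_clean, pv_main _ hL]
  cases hb : pvBLastEDBlock (((PySem.Chars.splitlines stdout.toList).map PySem.Chars.strip).filter
      (fun l => l ≠ [])) with
  | none => simp only [hb, pvPhi]
  | some er =>
    obtain ⟨e, rest⟩ := er
    simp only [hb, pvPhi]
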